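-- pv_equiv track=rewrite | github.com/kjk402/PythonWork | programmers/level1/3.py | solution
-- ===== SOURCE A (Python) =====
-- def solution(party, complet):
--     party.sort()
--     complet.sort()
--     answer = []
--     for person in party:
--         if person not in complet:
--             answer.append(person)
--
--         else:
--             complet.pop(0)
--     return answer
-- ===== SOURCE B (Python) =====
-- def solution(party, complet):
--     # Two-pointer merge over the two sorted lists: j counts the elements of
--     # complet <= current person (a monotone frontier), k counts the matches
--     # popped so far; replaces A's O(m) membership scan and O(m) pop(0).
--     party.sort()
--     complet.sort()
--     answer = []
--     j = 0  # number of elements of complet <= current person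
--     k = 0  # number of matches so far (A pops one front element per match)
--     for person in party:
--         while j < len(complet) and complet[j] <= person:
--             j += 1
--         if j > k and complet[j - 1] == person:
--             k += 1
--         else:
--             answer.append(person)
--     return answer
-- ===== Notes on version B (the rewrite author's own statement) =====
-- stated objective: faster
-- what changed: Replaces A's per-person linear membership scan of the remaining list and O(m) pop(0) with a single two-pointer merge over the two sorted lists (a monotone frontier j = #elements of complet <= person, and a match counter k instead of popping).
import Mathlib
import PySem

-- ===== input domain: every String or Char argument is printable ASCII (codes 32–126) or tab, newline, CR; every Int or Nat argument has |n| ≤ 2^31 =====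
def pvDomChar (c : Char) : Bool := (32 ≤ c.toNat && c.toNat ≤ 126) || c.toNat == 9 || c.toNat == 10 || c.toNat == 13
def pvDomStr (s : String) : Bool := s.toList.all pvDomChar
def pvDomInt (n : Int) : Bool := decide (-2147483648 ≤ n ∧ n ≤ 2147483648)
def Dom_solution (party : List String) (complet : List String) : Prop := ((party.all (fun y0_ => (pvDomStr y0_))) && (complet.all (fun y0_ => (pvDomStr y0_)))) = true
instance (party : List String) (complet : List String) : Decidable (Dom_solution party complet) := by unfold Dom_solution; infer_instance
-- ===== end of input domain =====

-- B replaces A's per-person scan of the remaining completed list (and its pop(0))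
-- by a two-pointer merge over the two sorted lists: asymptotically faster.
-- A sorts both arguments in place and pops from `complet`; the equivalence proved
-- here is about the RETURN value only (B performs the same in-place sorts).

-- ===== PORT A =====
-- the body of A's for-loop (append if absent, else pop(0) from the remaining list)
def pvStepA : (List String × List String) → String → (List String × List String) :=
  fun st person =>
    if person ∉ st.2 then (st.1 ++ [person], st.2)
    else (st.1, match PySem.List.pop? st.2 0 with   -- complet.pop(0); st.2 ≠ [] in this branch
                | some (_, rest) => rest
                | none => st.2)

def solution (party : List String) (complet : List String) : List String :=
  let ps := PySem.List.sorted party (fun x => x) false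
  let cs := PySem.List.sorted complet (fun x => x) false
  (ps.foldl pvStepA ([], cs)).1

-- ===== PORT B =====
-- the `while j < len(complet) and complet[j] <= person: j += 1` loop
def pvAdvance (cs : List String) (person : String) (j : Nat) : Nat :=
  if h : j < cs.length then
    if cs[j] ≤ person then pvAdvance cs person (j + 1) else j
  else j
termination_by cs.length - j

def pvStepB (cs : List String) : (Nat × Nat × List String) → String → (Nat × Nat × List String) :=
  fun st person =>
    let j := pvAdvance cs person st.1
    if j > st.2.1 ∧ cs[j - 1]? = some person then (j, st.2.1 + 1, st.2.2)
    else (j, st.2.1, st.2.2 ++ [person])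

def solution_alt (party : List String) (complet : List String) : List String :=
  let ps := PySem.List.sorted party (fun x => x) false
  let cs := PySem.List.sorted complet (fun x => x) false
  (ps.foldl (pvStepB cs) (0, 0, [])).2.2

-- ===== PRECONDITION & SPEC =====
def Spec_solution (party : List String) (complet : List String) (out : List String) : Prop := out = solution_alt party complet
instance (party : List String) (complet : List String) (out : List String) : Decidable (Spec_solution party complet out) := by unfold Spec_solution; infer_instance

-- ===== CLAIM (what is proved, stated in full; the proofs are below) =====
def Claim_equal_solution : Prop := ∀ (party : List String) (complet : List String), Dom_solution party complet → Spec_solution party complet (solution party complet)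

-- ===== LEMMAS AND PROOFS =====

-- number of elements of cs that are ≤ person
def pvCnt (cs : List String) (person : String) : Nat := cs.countP (fun x => decide (x ≤ person))

theorem pvCnt_le_length (cs : List String) (person : String) : pvCnt cs person ≤ cs.length :=
  List.countP_le_length

theorem pvCnt_cons_of_le {a person : String} (t : List String) (hap : a ≤ person) :
    pvCnt (a :: t) person = pvCnt t person + 1 := by
  have hd : decide (a ≤ person) = true := decide_eq_true hap
  unfold pvCnt
  rw [List.countP_cons, hd]
  rfl

theorem pvCnt_cons_of_not_le {a person : String} (t : List String) (hap : ¬ a ≤ person) :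
    pvCnt (a :: t) person = pvCnt t person := by
  have hd : decide (a ≤ person) = false := decide_eq_false hap
  unfold pvCnt
  rw [List.countP_cons, hd]
  rfl

theorem pvCnt_pos_of_mem {cs : List String} {person : String} (hm : person ∈ cs) :
    0 < pvCnt cs person :=
  List.countP_pos_iff.mpr ⟨person, hm, decide_eq_true le_rfl⟩

-- in a sorted list, the elements ≤ person below the head count to zero when the head exceeds person,
-- and more generally the tail counts to zero when person is the head and not in the tail
theorem pvCnt_tail_zero {a : String} {t : List String} (ha : ∀ x ∈ t, a ≤ x)
    {person : String} (hp : ∀ x ∈ t, x ≤ person → x = a → False) (hpa : person = a) :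
    pvCnt t person = 0 := by
  refine List.countP_eq_zero.mpr ?_
  intro x hx
  simp only [decide_eq_true_eq]
  intro hxp
  exact hp x hx hxp (le_antisymm (hpa ▸ hxp) (ha x hx))

-- characterization of the sorted frontier: cs[i] ≤ person exactly below pvCnt
theorem pvCnt_char (cs : List String) (hs : cs.Pairwise (· ≤ ·)) (person : String)
    (i : Nat) (h : i < cs.length) : cs[i] ≤ person ↔ i < pvCnt cs person := by
  induction cs generalizing i with
  | nil => simp at h
  | cons a t ih =>
    rcases List.pairwise_cons.mp hs with ⟨ha, ht⟩
    by_cases hap : a ≤ person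
    · rw [pvCnt_cons_of_le t hap]
      cases i with
      | zero => simpa using hap
      | succ i =>
        have h' : i < t.length := by simpa using h
        simpa [Nat.succ_lt_succ_iff] using ih ht i h'
    · have hz : pvCnt t person = 0 := by
        refine List.countP_eq_zero.mpr ?_
        intro x hx
        simp only [decide_eq_true_eq]
        intro hxp
        exact hap (le_trans (ha x hx) hxp)
      rw [pvCnt_cons_of_not_le t hap, hz]
      cases i with
      | zero => simpa using hap
      | succ i =>
        have h' : i < t.length := by simpa using h
        constructor
        · intro hle
          exact absurd (le_trans (ha _ (List.getElem_mem h')) (by simpa using hle)) hap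
        · intro hlt; omega

-- the while-loop computes the frontier when started at or below it
theorem pvAdvance_eq (cs : List String) (hs : cs.Pairwise (· ≤ ·)) (person : String)
    (j : Nat) (hj : j ≤ pvCnt cs person) : pvAdvance cs person j = pvCnt cs person := by
  by_cases h : j < cs.length
  · rw [pvAdvance]
    simp only [h, dif_pos]
    by_cases hle : cs[j] ≤ person
    · have hj' : j < pvCnt cs person := (pvCnt_char cs hs person j h).mp hle
      rw [if_pos hle]
      exact pvAdvance_eq cs hs person (j + 1) hj'
    · have : ¬ j < pvCnt cs person := fun hlt => hle ((pvCnt_char cs hs person j h).mpr hlt)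
      rw [if_neg hle]; omega
  · have := pvCnt_le_length cs person
    rw [pvAdvance]
    simp only [h, dif_neg, not_false_iff]
    omega
termination_by cs.length - j

-- membership in the k-suffix of a sorted list, via the frontier count
theorem pv_mem_drop_iff (cs : List String) (hs : cs.Pairwise (· ≤ ·)) (person : String)
    (k : Nat) : person ∈ cs.drop k ↔ person ∈ cs ∧ k < pvCnt cs person := by
  induction cs generalizing k with
  | nil => simp
  | cons a t ih =>
    rcases List.pairwise_cons.mp hs with ⟨ha, ht⟩
    cases k with
    | zero =>
      simp only [List.drop_zero]
      exact ⟨fun hm => ⟨hm, pvCnt_pos_of_mem hm⟩, fun h => h.1⟩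
    | succ k =>
      have hdrop : (a :: t).drop (k + 1) = t.drop k := rfl
      rw [hdrop, ih ht k]
      by_cases hmt : person ∈ t
      · have hap : a ≤ person := ha person hmt
        rw [pvCnt_cons_of_le t hap]
        simp [hmt]
      · constructor
        · intro h; exact absurd h.1 hmt
        · rintro ⟨hm, hk⟩
          have hpa : person = a := by
            rcases List.mem_cons.mp hm with h | h
            · exact h
            · exact absurd h hmt
          have hz : pvCnt t person = 0 :=
            pvCnt_tail_zero ha (fun x hx _ hxa => hmt (by rw [hpa, ← hxa]; exact hx)) hpa
          have hcnt : pvCnt (a :: t) person ≤ 1 := by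
            by_cases hap : a ≤ person
            · rw [pvCnt_cons_of_le t hap, hz]
            · rw [pvCnt_cons_of_not_le t hap, hz]; omega
          omega

-- in a sorted list containing person, the last element ≤ person is person itself
theorem pv_getElem_cnt_sub_one (cs : List String) (hs : cs.Pairwise (· ≤ ·)) (person : String)
    (hm : person ∈ cs) : cs[pvCnt cs person - 1]? = some person := by
  induction cs with
  | nil => simp at hm
  | cons a t ih =>
    rcases List.pairwise_cons.mp hs with ⟨ha, ht⟩
    by_cases hmt : person ∈ t
    · have hap : a ≤ person := ha person hmt
      rw [pvCnt_cons_of_le t hap]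
      have hpos : 0 < pvCnt t person := pvCnt_pos_of_mem hmt
      have heq : pvCnt t person + 1 - 1 = (pvCnt t person - 1) + 1 := by omega
      rw [heq]
      simpa using ih ht hmt
    · have hpa : person = a := by
        rcases List.mem_cons.mp hm with h | h
        · exact h
        · exact absurd h hmt
      have hz : pvCnt t person = 0 :=
        pvCnt_tail_zero ha (fun x hx _ hxa => hmt (by rw [hpa, ← hxa]; exact hx)) hpa
      have hap : a ≤ person := hpa ▸ le_rfl
      rw [pvCnt_cons_of_le t hap, hz]
      simp [hpa]

theorem pv_main (cs : List String) (hs : cs.Pairwise (· ≤ ·)) :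
    ∀ (ps : List String), ps.Pairwise (· ≤ ·) →
    ∀ (j k : Nat) (ans : List String), (∀ x ∈ ps, j ≤ pvCnt cs x) →
    (ps.foldl pvStepA (ans, cs.drop k)).1 = (ps.foldl (pvStepB cs) (j, k, ans)).2.2 := by
  intro ps
  induction ps with
  | nil => intro _ j k ans _; rfl
  | cons person rest ih =>
    intro hps j k ans hj
    rcases List.pairwise_cons.mp hps with ⟨hhd, hrest⟩
    have hjp : j ≤ pvCnt cs person := hj person (List.mem_cons_self ..)
    have hadv : pvAdvance cs person j = pvCnt cs person := pvAdvance_eq cs hs person j hjp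
    have hmono : ∀ x ∈ rest, pvCnt cs person ≤ pvCnt cs x := by
      intro x hx
      refine List.countP_mono_left ?_
      intro y _ hy
      simp only [decide_eq_true_eq] at hy ⊢
      exact le_trans hy (hhd x hx)
    have hcond : person ∈ cs.drop k ↔
        (pvCnt cs person > k ∧ cs[pvCnt cs person - 1]? = some person) := by
      constructor
      · intro hm
        rcases (pv_mem_drop_iff cs hs person k).mp hm with ⟨hmc, hk⟩
        exact ⟨hk, pv_getElem_cnt_sub_one cs hs person hmc⟩
      · rintro ⟨hk, hg⟩
        have hmc : person ∈ cs := by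
          rcases List.getElem?_eq_some_iff.mp hg with ⟨h, he⟩
          exact he ▸ List.getElem_mem h
        exact (pv_mem_drop_iff cs hs person k).mpr ⟨hmc, hk⟩
    simp only [List.foldl_cons]
    by_cases hm : person ∈ cs.drop k
    · -- match branch: A pops the front of the remaining suffix, B increments k
      rcases hcond.mp hm with ⟨hk, hg⟩
      have hstepA : pvStepA (ans, cs.drop k) person = (ans, cs.drop (k + 1)) := by
        have htl : (cs.drop k).tail = cs.drop (k + 1) := by simp [List.tail_drop]
        rcases hdk : cs.drop k with _ | ⟨x, xs⟩
        · rw [hdk] at hm; simp at hm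
        · rw [hdk] at hm htl
          simp only [pvStepA]
          rw [if_neg (not_not_intro hm)]
          simp [PySem.List.pop?_zero_cons]
          exact htl
      have hstepB : pvStepB cs (j, k, ans) person = (pvCnt cs person, k + 1, ans) := by
        simp only [pvStepB, hadv]
        rw [if_pos ⟨hk, hg⟩]
      rw [hstepA, hstepB]
      exact ih hrest (pvCnt cs person) (k + 1) ans hmono
    · -- no match: both append person
      have hstepA : pvStepA (ans, cs.drop k) person = (ans ++ [person], cs.drop k) := by
        simp only [pvStepA]; rw [if_pos hm]
      have hstepB : pvStepB cs (j, k, ans) person = (pvCnt cs person, k, ans ++ [person]) := by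
        simp only [pvStepB, hadv]
        rw [if_neg (fun h => hm (hcond.mpr ⟨h.1, h.2⟩))]
      rw [hstepA, hstepB]
      exact ih hrest (pvCnt cs person) k (ans ++ [person]) hmono

-- ===== VERDICT (by name: the statement is the Claim_ definition above) =====
theorem solution_spec : Claim_equal_solution := by
  intro party complet _
  show solution party complet = solution_alt party complet
  unfold solution solution_alt
  have hp : (PySem.List.sorted party (fun x => x) false).Pairwise (· ≤ ·) :=
    PySem.List.sorted_pairwise ..
  have hc : (PySem.List.sorted complet (fun x => x) false).Pairwise (· ≤ ·) :=
    PySem.List.sorted_pairwise ..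
  have := pv_main (PySem.List.sorted complet (fun x => x) false) hc
      (PySem.List.sorted party (fun x => x) false) hp 0 0 [] (fun _ _ => Nat.zero_le _)
  simpa using this
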